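-- pv_equiv track=rewrite | github.com/eosphoros-ai/Text2SQL-Eval | utils/extract_sql_meta.py | find_column_name_in_tables
-- ===== SOURCE A (Python) =====
-- def find_column_name_in_tables(tables, column_name, in_tables=None):
--     for _, value in in_tables.items():
--         if isinstance(value, dict):
--             return []
--     table_result = []
--     for table, table_column_names in tables.items():
--         if column_name.lower() in table_column_names:
--             if in_tables is not None:
--                 for alias, table_name in in_tables.items():
--                     if table_name.lower() == table:
--                         table_result.append(table)
--             else:
--                 table_result.append(table)
--     return table_result
-- ===== SOURCE B (Python) =====
-- def find_column_name_in_tables(tables, column_name, in_tables=None):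
--     col = column_name.lower()
--     if in_tables is None:
--         return [t for t, cols in tables.items() if col in cols]
--     counts = {}
--     for name in in_tables.values():
--         k = name.lower()
--         counts[k] = counts.get(k, 0) + 1
--     out = []
--     for t, cols in tables.items():
--         if col in cols:
--             out += [t] * counts.get(t, 0)
--     return out
-- ===== Notes on version B (the rewrite author's own statement) =====
-- stated objective: faster
-- what changed: B precomputes a dict counting lowercased alias table-names in one pass over in_tables, then does a single pass over tables extending the result by [table]*count, instead of A's inner scan over all aliases for every matching table; on in_tables=None (where A raises AttributeError, excluded by Pre_) B returns each matching table once.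
import Mathlib
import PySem

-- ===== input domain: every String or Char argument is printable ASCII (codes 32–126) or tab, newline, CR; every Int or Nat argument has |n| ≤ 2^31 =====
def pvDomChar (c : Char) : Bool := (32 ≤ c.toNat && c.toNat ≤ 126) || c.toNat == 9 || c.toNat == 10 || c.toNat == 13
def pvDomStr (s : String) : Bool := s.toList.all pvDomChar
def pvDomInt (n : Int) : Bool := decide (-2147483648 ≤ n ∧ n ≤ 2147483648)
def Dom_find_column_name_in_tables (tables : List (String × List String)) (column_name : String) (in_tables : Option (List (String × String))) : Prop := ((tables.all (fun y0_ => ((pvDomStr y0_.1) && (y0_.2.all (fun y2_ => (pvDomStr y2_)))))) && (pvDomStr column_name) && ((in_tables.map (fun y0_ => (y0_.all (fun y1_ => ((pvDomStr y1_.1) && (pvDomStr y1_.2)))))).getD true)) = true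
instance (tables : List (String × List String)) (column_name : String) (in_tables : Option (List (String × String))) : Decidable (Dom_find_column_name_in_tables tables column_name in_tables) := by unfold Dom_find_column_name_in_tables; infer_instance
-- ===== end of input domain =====

-- B replaces A's per-table scan over all aliases by a precomputed count dict: O(T+A) instead of O(T*A).


-- ===== PORT A =====
-- Literal port of A. On in_tables = none the Python raises AttributeError (in_tables.items());
-- that input is excluded by Pre_, the port returns [] there (unclaimed).
-- The 'isinstance(value, dict)' early return never fires: under the type convention all values are strings.
def find_column_name_in_tables (tables : List (String × List String)) (column_name : String) (in_tables : Option (List (String × String))) : List String :=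
  match in_tables with
  | none => []
  | some its =>
    tables.foldl (fun acc p =>
      if PySem.Str.lower column_name ∈ p.2 then
        its.foldl (fun acc2 q => if PySem.Str.lower q.2 == p.1 then acc2 ++ [p.1] else acc2) acc
      else acc) []

-- ===== PORT B =====
def find_column_name_in_tables_alt (tables : List (String × List String)) (column_name : String) (in_tables : Option (List (String × String))) : List String :=
  let col := PySem.Str.lower column_name
  match in_tables with
  | none => (tables.filter (fun p => col ∈ p.2)).map (·.1)
  | some its =>
    let counts : PySem.Dict String Int :=
      (its.map (fun q => PySem.Str.lower q.2)).foldl (fun d k => d.insert k (d.getD k 0 + 1)) PySem.Dict.empty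
    tables.foldl (fun out p =>
      if col ∈ p.2 then out ++ List.replicate (counts.getD p.1 0).toNat p.1 else out) []

-- ===== PRECONDITION & SPEC =====
-- Pre_ excludes only in_tables = None, where A raises AttributeError before its own None check.
def Pre_find_column_name_in_tables (tables : List (String × List String)) (column_name : String) (in_tables : Option (List (String × String))) : Prop := in_tables.isSome = true
instance (tables : List (String × List String)) (column_name : String) (in_tables : Option (List (String × String))) : Decidable (Pre_find_column_name_in_tables tables column_name in_tables) := by unfold Pre_find_column_name_in_tables; infer_instance
def pvWitness_find_column_name_in_tables : (List (String × List String)) × String × (Option (List (String × String))) := ([("t", ["c", "d"]), ("u", ["c"])], "C", some [("x", "T"), ("y", "t"), ("z", "u")])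

def Spec_find_column_name_in_tables (tables : List (String × List String)) (column_name : String) (in_tables : Option (List (String × String))) (out : List String) : Prop := out = find_column_name_in_tables_alt tables column_name in_tables
instance (tables : List (String × List String)) (column_name : String) (in_tables : Option (List (String × String))) (out : List String) : Decidable (Spec_find_column_name_in_tables tables column_name in_tables out) := by unfold Spec_find_column_name_in_tables; infer_instance

-- ===== CLAIM (what is proved, stated in full; the proofs are below) =====
def Claim_equal_find_column_name_in_tables : Prop := ∀ (tables : List (String × List String)) (column_name : String) (in_tables : Option (List (String × String))), Dom_find_column_name_in_tables tables column_name in_tables → Pre_find_column_name_in_tables tables column_name in_tables → Spec_find_column_name_in_tables tables column_name in_tables (find_column_name_in_tables tables column_name in_tables)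

-- ===== LEMMAS AND PROOFS =====

-- the count dict B builds: looking up t yields the number of aliases whose lowered name is t
lemma counts_getD (its : List (String × String)) (t : String) :
    (((its.map (fun q => PySem.Str.lower q.2)).foldl (fun d k => d.insert k (d.getD k 0 + 1)) PySem.Dict.empty).getD t 0)
      = ((its.map (fun q => PySem.Str.lower q.2)).count t : Int) := by
  rw [PySem.Dict.getD_foldl_insert_add_one]
  simp

-- A's inner alias scan for a fixed table t appends exactly count-many copies of t
lemma inner_scan (its : List (String × String)) (t : String) (acc : List String) :
    its.foldl (fun acc2 q => if PySem.Str.lower q.2 == t then acc2 ++ [t] else acc2) acc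
      = acc ++ List.replicate ((its.map (fun q => PySem.Str.lower q.2)).count t) t := by
  rw [PySem.List.foldl_append_if (f := fun _ => t)]
  congr 1
  rw [List.count, List.countP_map, List.eq_replicate_iff]
  constructor
  · simp [List.countP_eq_length_filter]; rfl
  · simp

-- ===== VERDICT (by name: the statement is the Claim_ definition above) =====
theorem find_column_name_in_tables_spec : Claim_equal_find_column_name_in_tables := by
  intro tables column_name in_tables _ hpre
  unfold Spec_find_column_name_in_tables find_column_name_in_tables find_column_name_in_tables_alt
  match in_tables with
  | none => simp [Pre_find_column_name_in_tables] at hpre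
  | some its =>
    simp only
    apply PySem.List.foldl_congr_mem
    intro acc p _
    by_cases h : PySem.Str.lower column_name ∈ p.2
    · rw [if_pos h, if_pos h, inner_scan, counts_getD]
      simp
    · simp [h]
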